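-- pv_equiv track=rewrite | github.com/abbasmoosajee07/AdventofCode | 2015/03/2015Day03.py | count_houses_with_presents
-- ===== SOURCE A (Python) =====
-- def count_houses_with_presents(directions):
--     # Starting positions for Santa and Robo-Santa
--     santa_x, santa_y = 0, 0
--     robo_x, robo_y = 0, 0
--     # Set to keep track of visited houses
--     visited_houses = set()
--
--     # Add starting house (both Santa and Robo-Santa deliver to the same starting house)
--     visited_houses.add((santa_x, santa_y))
--
--     # Loop through directions and alternate moves between Santa and Robo-Santa
--     for i, direction in enumerate(directions):
--         if i % 2 == 0:  # Santa's turn (even index)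
--             if direction == '^':
--                 santa_y += 1  # Move north
--             elif direction == 'v':
--                 santa_y -= 1  # Move south
--             elif direction == '>':
--                 santa_x += 1  # Move east
--             elif direction == '<':
--                 santa_x -= 1  # Move west
--
--             # Add Santa's new position to the set of visited houses
--             visited_houses.add((santa_x, santa_y))
--         else:  # Robo-Santa's turn (odd index)
--             if direction == '^':
--                 robo_y += 1  # Move north
--             elif direction == 'v':
--                 robo_y -= 1  # Move south
--             elif direction == '>':
--                 robo_x += 1  # Move east
--             elif direction == '<':
--                 robo_x -= 1  # Move west
--
--             # Add Robo-Santa's new position to the set of visited houses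
--             visited_houses.add((robo_x, robo_y))
--
--     # Return the number of unique houses visited
--     return len(visited_houses)
-- ===== SOURCE B (Python) =====
-- def _delta(ch):
--     if ch == '^':
--         return (0, 1)
--     if ch == 'v':
--         return (0, -1)
--     if ch == '>':
--         return (1, 0)
--     if ch == '<':
--         return (-1, 0)
--     return (0, 0)
--
--
-- def count_houses_with_presents(directions):
--     # Two positional passes: Santa walks the even-indexed moves, Robo-Santa
--     # the odd-indexed ones; both drop presents into one shared set.
--     visited = {(0, 0)}
--     for moves in (directions[0::2], directions[1::2]):
--         x, y = 0, 0
--         for ch in moves: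
--             dx, dy = _delta(ch)
--             x += dx
--             y += dy
--             visited.add((x, y))
--     return len(visited)
-- ===== Notes on version B (the rewrite author's own statement) =====
-- stated objective: alternative
-- what changed: Replaces the single interleaved loop that branches on i%2 with two independent positional passes over the strided slices directions[0::2] and directions[1::2], each accumulating its own (x,y) walk into one shared visited set, with a (dx,dy) delta function instead of per-direction branch bodies.
import Mathlib
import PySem

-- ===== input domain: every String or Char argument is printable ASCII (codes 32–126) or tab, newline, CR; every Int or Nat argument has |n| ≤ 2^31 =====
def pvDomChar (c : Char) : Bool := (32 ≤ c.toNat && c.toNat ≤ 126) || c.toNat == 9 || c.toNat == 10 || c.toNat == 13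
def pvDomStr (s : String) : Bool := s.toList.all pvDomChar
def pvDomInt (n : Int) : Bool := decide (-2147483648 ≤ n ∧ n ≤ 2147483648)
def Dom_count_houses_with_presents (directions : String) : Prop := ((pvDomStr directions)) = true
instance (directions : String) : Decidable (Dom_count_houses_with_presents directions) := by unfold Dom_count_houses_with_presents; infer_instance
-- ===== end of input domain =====

-- B replaces A's single i%2-branched interleaved loop by two independent positional
-- passes over the strided slices directions[0::2] / directions[1::2] (objective: alternative).

-- ===== PORT A =====
-- one iteration of A's 'for i, direction in enumerate(directions)' loop
def aStep (st : Int × Int × Int × Int × PySem.Set (Int × Int)) (p : Int × Char) :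
    Int × Int × Int × Int × PySem.Set (Int × Int) :=
  let (sx, sy, rx, ry, vis) := st
  let (i, direction) := p
  if PySem.Int.mod i 2 == 0 then
    let (sx, sy) :=
      if direction == '^' then (sx, sy + 1)
      else if direction == 'v' then (sx, sy - 1)
      else if direction == '>' then (sx + 1, sy)
      else if direction == '<' then (sx - 1, sy)
      else (sx, sy)
    (sx, sy, rx, ry, vis.add (sx, sy))
  else
    let (rx, ry) :=
      if direction == '^' then (rx, ry + 1)
      else if direction == 'v' then (rx, ry - 1)
      else if direction == '>' then (rx + 1, ry)
      else if direction == '<' then (rx - 1, ry)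
      else (rx, ry)
    (sx, sy, rx, ry, vis.add (rx, ry))

def count_houses_with_presents (directions : String) : Int :=
  let st0 : Int × Int × Int × Int × PySem.Set (Int × Int) :=
    (0, 0, 0, 0, PySem.Set.add PySem.Set.empty (0, 0))
  let st := (PySem.List.enumerate directions.toList 0).foldl aStep st0
  PySem.Set.len st.2.2.2.2

-- ===== PORT B =====
def bDelta (ch : Char) : Int × Int :=
  if ch == '^' then (0, 1)
  else if ch == 'v' then (0, -1)
  else if ch == '>' then (1, 0)
  else if ch == '<' then (-1, 0)
  else (0, 0)

-- the inner 'for ch in moves' loop of B, over one strided slice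
def bWalk (moves : List Char) (st : Int × Int × PySem.Set (Int × Int)) :
    Int × Int × PySem.Set (Int × Int) :=
  moves.foldl (fun (st : Int × Int × PySem.Set (Int × Int)) ch =>
    let (x, y, vis) := st
    let (dx, dy) := bDelta ch
    (x + dx, y + dy, vis.add (x + dx, y + dy))) st

def count_houses_with_presents_alt (directions : String) : Int :=
  let visited : PySem.Set (Int × Int) := PySem.Set.ofList [((0 : Int), (0 : Int))]
  let evens := (PySem.List.slice? directions.toList (some 0) none 2).getD []
  let odds := (PySem.List.slice? directions.toList (some 1) none 2).getD []
  let st1 := bWalk evens (0, 0, visited)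
  let st2 := bWalk odds (0, 0, st1.2.2)
  PySem.Set.len st2.2.2

-- ===== PRECONDITION & SPEC =====
def Spec_count_houses_with_presents (directions : String) (out : Int) : Prop := out = count_houses_with_presents_alt directions
instance (directions : String) (out : Int) : Decidable (Spec_count_houses_with_presents directions out) := by unfold Spec_count_houses_with_presents; infer_instance

-- ===== CLAIM (what is proved, stated in full; the proofs are below) =====
def Claim_equal_count_houses_with_presents : Prop := ∀ (directions : String), Dom_count_houses_with_presents directions → Spec_count_houses_with_presents directions (count_houses_with_presents directions)

-- ===== LEMMAS AND PROOFS =====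

-- elements at even positions of a list
def stride2 {α : Type} : List α → List α
  | [] => []
  | [a] => [a]
  | a :: _ :: t => a :: stride2 t

theorem stride2_cons {α : Type} (a : α) (t : List α) :
    stride2 (a :: t) = a :: stride2 t.tail := by
  cases t <;> rfl

theorem stride2_spec {α : Type} (xs : List α) :
    (List.range ((xs.length + 1) / 2)).filterMap (fun k => xs[2 * k]?) = stride2 xs := by
  induction xs using stride2.induct with
  | case1 => simp [stride2]
  | case2 a => simp [stride2, List.range_succ]
  | case3 a b t ih =>
    have hl : ((a :: b :: t).length + 1) / 2 = (t.length + 1) / 2 + 1 := by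
      simp [List.length_cons]; omega
    rw [hl, List.range_succ_eq_map, List.filterMap_cons, List.filterMap_map]
    simp only [Nat.mul_zero, List.getElem?_cons_zero, stride2]
    refine congrArg (a :: ·) ?_
    rw [← ih]
    exact List.filterMap_congr (fun k _ => by
      simp only [Function.comp, Nat.mul_succ]
      rw [show 2 * k + 2 = (2 * k) + 1 + 1 by ring]
      simp [List.getElem?_cons_succ])

theorem slice2_zero {α : Type} (xs : List α) :
    PySem.List.slice? xs (some 0) none 2 = some (stride2 xs) := by
  simp only [PySem.List.slice?, PySem.List.sliceIndices]
  norm_num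
  rw [show (if 0 < xs.length then (((xs.length : Int) + 2 - 1) / 2).toNat else 0)
        = (xs.length + 1) / 2 by split_ifs with h <;> omega]
  rw [← stride2_spec xs]
  exact List.filterMap_congr (fun x _ => by rw [show ((2 * (x:Int)).toNat) = 2 * x by omega])

theorem slice2_one {α : Type} (xs : List α) :
    PySem.List.slice? xs (some 1) none 2 = some (stride2 xs.tail) := by
  cases xs with
  | nil => rfl
  | cons a t =>
    simp only [PySem.List.slice?, PySem.List.sliceIndices]
    norm_num
    rw [show (if 0 < t.length then (((t.length : Int) + 2 - 1) / 2).toNat else 0)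
          = (t.length + 1) / 2 by split_ifs with h <;> omega]
    rw [← stride2_spec t]
    exact List.filterMap_congr (fun x _ => by
      rw [show ((1 + 2 * (x:Int)).toNat) = 2 * x + 1 by omega]
      simp [List.getElem?_cons_succ])

-- the successive positions of a walk following cs from (x, y)
def trail (x y : Int) : List Char → List (Int × Int)
  | [] => []
  | c :: t =>
    (x + (bDelta c).1, y + (bDelta c).2) ::
      trail (x + (bDelta c).1) (y + (bDelta c).2) t

-- A's move if-chain computes a bDelta step
theorem moveA (c : Char) (x y : Int) :
    (if c == '^' then (x, y + 1)
     else if c == 'v' then (x, y - 1)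
     else if c == '>' then (x + 1, y)
     else if c == '<' then (x - 1, y)
     else (x, y)) = (x + (bDelta c).1, y + (bDelta c).2) := by
  simp only [bDelta]; split_ifs <;> simp <;> ring

theorem aStep_eq (sx sy rx ry : Int) (vis : PySem.Set (Int × Int)) (i : Int) (c : Char) :
    aStep (sx, sy, rx, ry, vis) (i, c) =
      if PySem.Int.mod i 2 == 0 then
        (sx + (bDelta c).1, sy + (bDelta c).2, rx, ry,
          vis.add (sx + (bDelta c).1, sy + (bDelta c).2))
      else
        (sx, sy, rx + (bDelta c).1, ry + (bDelta c).2,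
          vis.add (rx + (bDelta c).1, ry + (bDelta c).2)) := by
  simp only [aStep, moveA]

theorem mod2_cases (n : Int) : PySem.Int.mod n 2 = 0 ∨ PySem.Int.mod n 2 = 1 := by
  rw [PySem.Int.mod_eq_emod_of_pos (by norm_num : (0:Int) < 2)]; omega

theorem mod2_succ (n : Int) : PySem.Int.mod (n + 1) 2 = 1 - PySem.Int.mod n 2 := by
  rw [PySem.Int.mod_eq_emod_of_pos (by norm_num : (0:Int) < 2),
      PySem.Int.mod_eq_emod_of_pos (by norm_num : (0:Int) < 2)]; omega

-- membership in the visited set after A's loop: the mover alternates with the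
-- index parity, so the visited positions are exactly the two strided trails
theorem aloop_mem (cs : List Char) :
    ∀ (n sx sy rx ry : Int) (vis : PySem.Set (Int × Int)) (p : Int × Int),
      p ∈ ((PySem.List.enumerate cs n).foldl aStep (sx, sy, rx, ry, vis)).2.2.2.2 ↔
        p ∈ vis ∨
          (if PySem.Int.mod n 2 = 0 then
             p ∈ trail sx sy (stride2 cs) ∨ p ∈ trail rx ry (stride2 cs.tail)
           else
             p ∈ trail rx ry (stride2 cs) ∨ p ∈ trail sx sy (stride2 cs.tail)) := by
  induction cs with
  | nil => intro n sx sy rx ry vis p; simp [stride2, trail]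
  | cons c t ih =>
    intro n sx sy rx ry vis p
    rw [PySem.List.enumerate_cons, List.foldl_cons, aStep_eq]
    rw [stride2_cons, List.tail_cons]
    rcases mod2_cases n with h | h
    · rw [if_pos (show (PySem.Int.mod n 2 == 0) = true by rw [h]; rfl), if_pos h]
      rw [ih (n + 1)]
      rw [if_neg (by rw [mod2_succ, h]; norm_num)]
      simp only [PySem.Set.mem_add, trail, List.mem_cons]
      tauto
    · rw [if_neg (show ¬((PySem.Int.mod n 2 == 0) = true) by rw [h]; decide),
          if_neg (show ¬(PySem.Int.mod n 2 = 0) by rw [h]; decide)]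
      rw [ih (n + 1)]
      rw [if_pos (by rw [mod2_succ, h]; norm_num)]
      simp only [PySem.Set.mem_add, trail, List.mem_cons]
      tauto

theorem aloop_nodup (cs : List Char) :
    ∀ (n sx sy rx ry : Int) (vis : PySem.Set (Int × Int)), vis.Nodup →
      ((PySem.List.enumerate cs n).foldl aStep (sx, sy, rx, ry, vis)).2.2.2.2.Nodup := by
  induction cs with
  | nil => intro n sx sy rx ry vis h; simpa using h
  | cons c t ih =>
    intro n sx sy rx ry vis h
    rw [PySem.List.enumerate_cons, List.foldl_cons, aStep_eq]
    split_ifs <;> exact ih _ _ _ _ _ _ (PySem.Set.nodup_add _ _ h)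

theorem bwalk_mem (cs : List Char) :
    ∀ (x y : Int) (vis : PySem.Set (Int × Int)) (p : Int × Int),
      p ∈ (bWalk cs (x, y, vis)).2.2 ↔ p ∈ vis ∨ p ∈ trail x y cs := by
  induction cs with
  | nil => intro x y vis p; simp [bWalk, trail]
  | cons c t ih =>
    intro x y vis p
    rw [show bWalk (c :: t) (x, y, vis)
          = bWalk t (x + (bDelta c).1, y + (bDelta c).2,
              vis.add (x + (bDelta c).1, y + (bDelta c).2)) from rfl]
    rw [ih]
    simp only [PySem.Set.mem_add, trail, List.mem_cons]
    tauto

theorem bwalk_nodup (cs : List Char) :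
    ∀ (x y : Int) (vis : PySem.Set (Int × Int)), vis.Nodup →
      (bWalk cs (x, y, vis)).2.2.Nodup := by
  induction cs with
  | nil => intro x y vis h; exact h
  | cons c t ih =>
    intro x y vis h
    exact ih _ _ _ (PySem.Set.nodup_add _ _ h)

-- ===== VERDICT (by name: the statement is the Claim_ definition above) =====
theorem count_houses_with_presents_spec : Claim_equal_count_houses_with_presents := by
  intro directions _
  unfold Spec_count_houses_with_presents count_houses_with_presents count_houses_with_presents_alt
  rw [slice2_zero, slice2_one]
  simp only [Option.getD_some, PySem.Set.len]
  have hnA := aloop_nodup directions.toList 0 0 0 0 0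
    (PySem.Set.add PySem.Set.empty (0, 0)) (by decide)
  have hnB := bwalk_nodup (stride2 directions.toList.tail) 0 0
    ((bWalk (stride2 directions.toList) (0, 0, PySem.Set.ofList [((0:Int), (0:Int))])).2.2)
    (bwalk_nodup (stride2 directions.toList) 0 0 _ (by decide))
  have hperm := (List.perm_ext_iff_of_nodup hnA hnB).mpr (fun p => by
    rw [aloop_mem, bwalk_mem, bwalk_mem]
    rw [if_pos (show PySem.Int.mod 0 2 = 0 by decide)]
    simp only [PySem.Set.mem_add, PySem.Set.mem_ofList, List.mem_singleton]
    tauto)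
  exact_mod_cast hperm.length_eq
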